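-- pv_equiv track=rewrite | github.com/Aireos/AA-CP1-projects | assighnments/a final project/main.py | armor_player
-- ===== SOURCE A (Python) =====
-- def armor_player(items):
--     for list in items:
--         if list[0] == "Armor(+5)":
--             return 5
--     for list in items:
--         if list[0] == "Armor(+4)":
--             return 4
--     for list in items:
--         if list[0] == "Armor(+3)":
--             return 3
--     for list in items:
--         if list[0] == "Armor(+2)":
--             return 2
--     for list in items:
--         if list[0] == "Armor(+1)":
--             return 1
--     else:
--         return 0
-- ===== SOURCE B (Python) =====
-- def _bonus(tag):
--     if tag == "Armor(+4)":
--         return 4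
--     elif tag == "Armor(+3)":
--         return 3
--     elif tag == "Armor(+2)":
--         return 2
--     elif tag == "Armor(+1)":
--         return 1
--     return 0
--
--
-- def armor_player(items):
--     best = 0
--     for item in items:
--         tag = item[0]
--         if tag == "Armor(+5)":
--             return 5
--         b = _bonus(tag)
--         if b > best:
--             best = b
--     return best
-- ===== Notes on version B (the rewrite author's own statement) =====
-- stated objective: simpler
-- what changed: Replaces A's five sequential scans (one per armor tier) by a single pass that keeps a running maximum bonus, with an early return on Armor(+5).
import Mathlib
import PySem

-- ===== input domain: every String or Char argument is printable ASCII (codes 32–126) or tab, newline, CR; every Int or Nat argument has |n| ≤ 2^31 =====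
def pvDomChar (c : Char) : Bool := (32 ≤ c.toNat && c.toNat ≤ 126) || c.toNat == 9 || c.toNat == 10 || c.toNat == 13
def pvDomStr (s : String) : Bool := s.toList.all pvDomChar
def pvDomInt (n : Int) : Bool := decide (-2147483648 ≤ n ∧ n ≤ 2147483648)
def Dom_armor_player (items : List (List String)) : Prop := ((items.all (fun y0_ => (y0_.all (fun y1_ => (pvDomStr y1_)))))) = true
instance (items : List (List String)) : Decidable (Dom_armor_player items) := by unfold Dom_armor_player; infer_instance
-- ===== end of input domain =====

-- B replaces A's five sequential scans by one pass with a running maximum; simpler, same results.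

-- ===== PORT A =====
-- one 'for list in items: if list[0] == tag: return k' loop of A; list[0] on [] is an
-- IndexError (pyGet? = none), excluded by Pre_ below, where the port's comparison is just false
def scanA (tag : String) : List (List String) → Bool
  | [] => false
  | l :: rest => if PySem.List.pyGet? l 0 = some tag then true else scanA tag rest

def armor_player (items : List (List String)) : Int :=
  if scanA "Armor(+5)" items then 5
  else if scanA "Armor(+4)" items then 4
  else if scanA "Armor(+3)" items then 3
  else if scanA "Armor(+2)" items then 2
  else if scanA "Armor(+1)" items then 1
  else 0

-- ===== PORT B =====
def altBonus (tag : String) : Int :=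
  if tag = "Armor(+4)" then 4
  else if tag = "Armor(+3)" then 3
  else if tag = "Armor(+2)" then 2
  else if tag = "Armor(+1)" then 1
  else 0

-- B's single loop; item[0] on [] raises (excluded by Pre_), ported as the default ""
def altLoop : List (List String) → Int → Int
  | [], best => best
  | l :: rest, best =>
    let tag := (PySem.List.pyGet? l 0).getD ""
    if tag = "Armor(+5)" then 5
    else altLoop rest (if altBonus tag > best then altBonus tag else best)

def armor_player_alt (items : List (List String)) : Int := altLoop items 0

-- ===== PRECONDITION & SPEC =====
-- Pre_ excludes exactly the inputs where both Pythons raise IndexError: an empty item reached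
-- before any item whose first element is "Armor(+5)" (list[0] on []).
def Pre_armor_player (items : List (List String)) : Prop :=
  ∀ i < items.length, items.getD i [] = [] →
    ∃ j < i, (items.getD j []).head? = some "Armor(+5)"
instance (items : List (List String)) : Decidable (Pre_armor_player items) := by
  unfold Pre_armor_player; infer_instance
def pvWitness_armor_player : List (List String) := [["Armor(+3)"], ["Sword", "x"]]

def Spec_armor_player (items : List (List String)) (out : Int) : Prop := out = armor_player_alt items
instance (items : List (List String)) (out : Int) : Decidable (Spec_armor_player items out) := by unfold Spec_armor_player; infer_instance

-- ===== CLAIM (what is proved, stated in full; the proofs are below) =====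
def Claim_equal_armor_player : Prop := ∀ (items : List (List String)), Dom_armor_player items → Pre_armor_player items → Spec_armor_player items (armor_player items)

-- ===== LEMMAS AND PROOFS =====

-- head of an item as B's port reads it
def hd (l : List String) : String := (PySem.List.pyGet? l 0).getD ""

lemma pyGet_some_iff (l : List String) (tag : String) (htag : tag ≠ "") :
    PySem.List.pyGet? l 0 = some tag ↔ hd l = tag := by
  cases l <;> simp [hd, PySem.List.pyGet?_zero, htag.symm]

lemma scan_true_iff (tag : String) (htag : tag ≠ "") (items : List (List String)) :
    scanA tag items = true ↔ ∃ l ∈ items, hd l = tag := by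
  induction items with
  | nil => simp [scanA]
  | cons l rest ih =>
    simp only [scanA]
    by_cases h : PySem.List.pyGet? l 0 = some tag
    · simp [h, (pyGet_some_iff l tag htag).1 h]
    · have : ¬ hd l = tag := fun he => h ((pyGet_some_iff l tag htag).2 he)
      simp [h, this, ih]

def bestOf (items : List (List String)) : Int :=
  items.foldr (fun l acc => max (altBonus (hd l)) acc) 0

lemma bestOf_nonneg (items : List (List String)) : 0 ≤ bestOf items := by
  induction items with
  | nil => simp [bestOf]
  | cons l rest ih => simp only [bestOf, List.foldr] at *; exact le_max_of_le_right ih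

lemma bestOf_le (items : List (List String)) (n : Int) (hn : 0 ≤ n)
    (h : ∀ l ∈ items, altBonus (hd l) ≤ n) : bestOf items ≤ n := by
  induction items with
  | nil => simpa [bestOf] using hn
  | cons l rest ih =>
    simp only [bestOf, List.foldr] at *
    exact max_le (h l (by simp)) (ih (fun x hx => h x (by simp [hx])))

lemma le_bestOf (items : List (List String)) (l : List String) (hl : l ∈ items) :
    altBonus (hd l) ≤ bestOf items := by
  induction items with
  | nil => cases hl
  | cons x rest ih =>
    simp only [bestOf, List.foldr] at *
    rcases List.mem_cons.1 hl with h | h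
    · exact h ▸ le_max_left _ _
    · exact le_max_of_le_right (ih h)

lemma loop_spec (items : List (List String)) (best : Int) (hb : 0 ≤ best) :
    altLoop items best =
      if scanA "Armor(+5)" items then 5 else max best (bestOf items) := by
  induction items generalizing best with
  | nil => simp [altLoop, scanA, bestOf, max_eq_left hb]
  | cons l rest ih =>
    simp only [altLoop, scanA]
    by_cases h5 : PySem.List.pyGet? l 0 = some "Armor(+5)"
    · simp [h5]
    · have hne : ¬ hd l = "Armor(+5)" := fun he => h5 ((pyGet_some_iff l _ (by decide)).2 he)
      have hmax : (if altBonus (hd l) > best then altBonus (hd l) else best)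
          = max best (altBonus (hd l)) := by
        rcases le_or_gt (altBonus (hd l)) best with h | h
        · simp [not_lt.2 h, max_eq_left h]
        · simp [h, max_eq_right (le_of_lt h)]
      have hb' : 0 ≤ max best (altBonus (hd l)) := le_max_of_le_left hb
      simp only [hd] at hne hmax hb'
      simp only [if_neg h5, if_neg hne, hmax]
      rw [ih _ hb']
      simp only [bestOf, List.foldr]
      simp only [hd]
      split
      · rfl
      · rw [max_assoc]

lemma altBonus_le_of_not4 (s : String) (h : s ≠ "Armor(+4)") : altBonus s ≤ 3 := by
  unfold altBonus; split_ifs <;> simp_all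

lemma altBonus_le_of_not3 (s : String) (h4 : s ≠ "Armor(+4)") (h3 : s ≠ "Armor(+3)") :
    altBonus s ≤ 2 := by
  unfold altBonus; split_ifs <;> simp_all

lemma altBonus_le_of_not2 (s : String) (h4 : s ≠ "Armor(+4)") (h3 : s ≠ "Armor(+3)")
    (h2 : s ≠ "Armor(+2)") : altBonus s ≤ 1 := by
  unfold altBonus; split_ifs <;> simp_all

lemma altBonus_le_of_not1 (s : String) (h4 : s ≠ "Armor(+4)") (h3 : s ≠ "Armor(+3)")
    (h2 : s ≠ "Armor(+2)") (h1 : s ≠ "Armor(+1)") : altBonus s ≤ 0 := by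
  unfold altBonus; split_ifs <;> simp_all

lemma altBonus_of_tag4 : altBonus "Armor(+4)" = 4 := by decide
lemma altBonus_of_tag3 : altBonus "Armor(+3)" = 3 := by decide
lemma altBonus_of_tag2 : altBonus "Armor(+2)" = 2 := by decide
lemma altBonus_of_tag1 : altBonus "Armor(+1)" = 1 := by decide

lemma ports_eq (items : List (List String)) : armor_player items = armor_player_alt items := by
  unfold armor_player armor_player_alt
  rw [loop_spec items 0 le_rfl]
  by_cases h5 : scanA "Armor(+5)" items
  · simp [h5]
  · rw [if_neg h5, if_neg h5, max_eq_right (bestOf_nonneg items)]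
    have notScan : ∀ tag, tag ≠ "" → ¬ scanA tag items = true → ∀ l ∈ items, hd l ≠ tag := by
      intro tag ht hs l hl he
      exact hs ((scan_true_iff tag ht items).2 ⟨l, hl, he⟩)
    by_cases h4 : scanA "Armor(+4)" items
    · obtain ⟨l, hl, he⟩ := (scan_true_iff _ (by decide) items).1 h4
      have hle := bestOf_le items 4 (by norm_num)
        (fun x _ => by unfold altBonus; split_ifs <;> omega)
      have hge : (4:Int) ≤ bestOf items := by
        have := le_bestOf items l hl; rwa [he, altBonus_of_tag4] at this
      rw [if_pos h4]; omega
    · have n4 := notScan _ (by decide) h4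
      by_cases h3 : scanA "Armor(+3)" items
      · obtain ⟨l, hl, he⟩ := (scan_true_iff _ (by decide) items).1 h3
        have hle := bestOf_le items 3 (by norm_num)
          (fun x hx => altBonus_le_of_not4 _ (n4 x hx))
        have hge : (3:Int) ≤ bestOf items := by
          have := le_bestOf items l hl; rwa [he, altBonus_of_tag3] at this
        rw [if_neg h4, if_pos h3]; omega
      · have n3 := notScan _ (by decide) h3
        by_cases h2 : scanA "Armor(+2)" items
        · obtain ⟨l, hl, he⟩ := (scan_true_iff _ (by decide) items).1 h2
          have hle := bestOf_le items 2 (by norm_num)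
            (fun x hx => altBonus_le_of_not3 _ (n4 x hx) (n3 x hx))
          have hge : (2:Int) ≤ bestOf items := by
            have := le_bestOf items l hl; rwa [he, altBonus_of_tag2] at this
          rw [if_neg h4, if_neg h3, if_pos h2]; omega
        · have n2 := notScan _ (by decide) h2
          by_cases h1 : scanA "Armor(+1)" items
          · obtain ⟨l, hl, he⟩ := (scan_true_iff _ (by decide) items).1 h1
            have hle := bestOf_le items 1 (by norm_num)
              (fun x hx => altBonus_le_of_not2 _ (n4 x hx) (n3 x hx) (n2 x hx))
            have hge : (1:Int) ≤ bestOf items := by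
              have := le_bestOf items l hl; rwa [he, altBonus_of_tag1] at this
            rw [if_neg h4, if_neg h3, if_neg h2, if_pos h1]; omega
          · have n1 := notScan _ (by decide) h1
            have hle := bestOf_le items 0 le_rfl
              (fun x hx => altBonus_le_of_not1 _ (n4 x hx) (n3 x hx) (n2 x hx) (n1 x hx))
            have hge := bestOf_nonneg items
            rw [if_neg h4, if_neg h3, if_neg h2, if_neg h1]; omega

-- ===== VERDICT (by name: the statement is the Claim_ definition above) =====
theorem armor_player_spec : Claim_equal_armor_player := by
  intro items _ _
  unfold Spec_armor_player
  exact ports_eq items
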